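-- pv_equiv track=rewrite | github.com/gjdnju/MLMN | article_condition_classifier.py | process_law_text2id
-- ===== SOURCE A (Python) =====
-- def process_law_text2id(line, dictionary):
--     init_content = line.strip()
--     vector = []
--     if init_content != "":
--         for word in dictionary:
--             times = 1 if str(init_content).count(word) > 0 else 0
--             vector.append(times)
--     return vector
-- ===== SOURCE B (Python) =====
-- def process_law_text2id(line, dictionary):
--     content = line.strip()
--     if not content:
--         return []
--     n = len(content)
--     present = set()
--     for L in {len(w) for w in dictionary}:
--         if L == 0:
--             present.add("")
--         elif L <= n:
--             for i in range(n - L + 1):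
--                 present.add(content[i:i + L])
--     return [1 if w in present else 0 for w in dictionary]
-- ===== Notes on version B (the rewrite author's own statement) =====
-- stated objective: faster
-- what changed: B inverts the traversal: instead of scanning the whole text with str.count once per dictionary word, it builds once a set of all substrings of the stripped text whose lengths occur in the dictionary (one staged pass over the text per distinct word length), then the vector is a pure set-membership map over the dictionary.
import Mathlib
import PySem

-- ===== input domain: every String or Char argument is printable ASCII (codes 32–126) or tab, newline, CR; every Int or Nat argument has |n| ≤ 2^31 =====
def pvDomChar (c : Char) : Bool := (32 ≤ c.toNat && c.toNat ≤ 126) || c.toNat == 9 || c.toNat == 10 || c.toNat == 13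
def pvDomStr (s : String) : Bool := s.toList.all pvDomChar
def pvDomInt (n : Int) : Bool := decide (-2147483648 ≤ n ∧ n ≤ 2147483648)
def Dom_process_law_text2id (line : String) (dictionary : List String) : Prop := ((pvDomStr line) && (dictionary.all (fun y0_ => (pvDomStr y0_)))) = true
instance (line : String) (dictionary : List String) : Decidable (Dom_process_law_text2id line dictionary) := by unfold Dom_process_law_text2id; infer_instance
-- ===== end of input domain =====

-- B indexes the text once: a set of all substrings of the stripped line whose lengths occur in the dictionary, then the vector is a membership map over the dictionary (alternative algorithm, per-word text scan removed).


-- ===== PORT A =====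
-- for word in dictionary: vector.append(1 if init_content.count(word) > 0 else 0)
def process_law_text2id (line : String) (dictionary : List String) : List Int :=
  let init_content := PySem.Str.strip line
  if init_content ≠ "" then
    dictionary.foldl (fun vector word =>
      vector ++ [if 0 < PySem.Str.count init_content word then (1 : Int) else 0]) []
  else []

-- ===== PORT B =====
-- Source B step for step, over List Char (content[i:i+L] = PySem.List.slice; the sets are PySem.Set)
def process_law_text2id_alt (line : String) (dictionary : List String) : List Int :=
  let content := PySem.Str.strip line
  if content = "" then []
  else
    let cs := content.toList
    let n := cs.length
    let lengths : PySem.Set Nat := PySem.Set.ofList (dictionary.map (fun w => w.toList.length))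
    let present : PySem.Set (List Char) :=
      lengths.foldl
        (fun present L =>
          if L = 0 then PySem.Set.add present []
          else if L ≤ n then
            (PySem.List.pyRange 0 ((n : Int) - (L : Int) + 1) 1).foldl
              (fun present i =>
                PySem.Set.add present (PySem.List.slice cs (some i) (some (i + (L : Int)))))
              present
          else present)
        PySem.Set.empty
    dictionary.map (fun w => if PySem.Set.contains present w.toList then (1 : Int) else 0)

-- ===== PRECONDITION & SPEC =====
def Spec_process_law_text2id (line : String) (dictionary : List String) (out : List Int) : Prop := out = process_law_text2id_alt line dictionary
instance (line : String) (dictionary : List String) (out : List Int) : Decidable (Spec_process_law_text2id line dictionary out) := by unfold Spec_process_law_text2id; infer_instance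

-- ===== CLAIM (what is proved, stated in full; the proofs are below) =====
def Claim_equal_process_law_text2id : Prop := ∀ (line : String) (dictionary : List String), Dom_process_law_text2id line dictionary → Spec_process_law_text2id line dictionary (process_law_text2id line dictionary)

-- ===== LEMMAS AND PROOFS =====

-- count.go never decreases its accumulator
theorem pv_count_go_le (sub : List Char) : ∀ (fuel : Nat) (l : List Char) (acc : Nat),
    acc ≤ PySem.Chars.count.go sub fuel l acc := by
  intro fuel
  induction fuel with
  | zero => intro l acc; simp [PySem.Chars.count.go]
  | succ n ih =>
      intro l acc
      cases l with
      | nil => simp [PySem.Chars.count.go]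
      | cons h t =>
          rw [PySem.Chars.count.go]
          split
          · exact le_trans (Nat.le_succ acc) (ih _ _)
          · exact ih _ _

-- count.go strictly increases iff sub occurs in l (sub nonempty, enough fuel)
theorem pv_count_go_pos_iff (sub : List Char) (hsub : sub ≠ []) :
    ∀ (fuel : Nat) (l : List Char), l.length ≤ fuel → ∀ (acc : Nat),
    (acc < PySem.Chars.count.go sub fuel l acc ↔ sub <:+: l) := by
  intro fuel
  induction fuel with
  | zero =>
      intro l hl acc
      have : l = [] := List.eq_nil_of_length_eq_zero (Nat.le_zero.mp hl)
      subst this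
      simp [PySem.Chars.count.go, List.infix_nil, hsub]
  | succ n ih =>
      intro l hl acc
      cases l with
      | nil =>
          simp [PySem.Chars.count.go, List.infix_nil, hsub]
      | cons h t =>
          rw [PySem.Chars.count.go]
          split
          · rename_i hpre
            constructor
            · intro _
              exact (List.IsPrefix.isInfix (List.isPrefixOf_iff_prefix.mp hpre))
            · intro _
              exact lt_of_lt_of_le (Nat.lt_succ_self acc) (pv_count_go_le _ _ _ _)
          · rename_i hpre
            have ht : t.length ≤ n := by simpa using hl
            rw [ih t ht acc, List.infix_cons_iff]
            constructor
            · intro hh; exact Or.inr hh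
            · rintro (hh | hh)
              · exact absurd (List.isPrefixOf_iff_prefix.mpr hh) hpre
              · exact hh

-- s.count(sub) > 0 ↔ sub infix s
theorem pv_count_pos_iff_infix (s sub : List Char) :
    0 < PySem.Chars.count s sub ↔ sub <:+: s := by
  by_cases hsub : sub = []
  · subst hsub
    simp [PySem.Chars.count]
  · unfold PySem.Chars.count
    simp only [List.isEmpty_iff, hsub, if_false]
    exact pv_count_go_pos_iff sub hsub s.length s le_rfl 0

-- membership after folding Set.add over any list
theorem pv_mem_foldl_add {α β : Type} [BEq α] [LawfulBEq α] (f : β → α) :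
    ∀ (l : List β) (acc : PySem.Set α) (x : α),
    x ∈ l.foldl (fun s i => PySem.Set.add s (f i)) acc ↔ x ∈ acc ∨ ∃ i ∈ l, x = f i := by
  intro l
  induction l with
  | nil => intro acc x; simp
  | cons h t ih =>
      intro acc x
      rw [List.foldl_cons, ih]
      rw [PySem.Set.mem_add]
      constructor
      · rintro ((hx | hx) | ⟨i, hi, hx⟩)
        · exact Or.inl hx
        · exact Or.inr ⟨h, by simp, hx⟩
        · exact Or.inr ⟨i, by simp [hi], hx⟩
      · rintro (hx | ⟨i, hi, hx⟩)
        · exact Or.inl (Or.inl hx)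
        · rcases List.mem_cons.mp hi with h1 | h1
          · exact Or.inl (Or.inr (h1 ▸ hx))
          · exact Or.inr ⟨i, h1, hx⟩

-- a clamped slice of natural bounds is a take of a drop
theorem pv_slice_eq (cs : List Char) (L : Nat) (i : Int) (hi : 0 ≤ i) :
    PySem.List.slice cs (some i) (some (i + (L : Int))) = (cs.drop i.toNat).take L := by
  rw [PySem.List.slice_toNat cs hi (by omega)]
  congr 1
  omega

-- what one step of the outer fold adds, as a predicate on the element
def pvAdds (cs : List Char) (L : Nat) (x : List Char) : Prop :=
  x.length = L ∧ x <:+: cs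

-- elements of the present-set built by B's nested folds
theorem pv_mem_present (cs : List Char) :
    ∀ (Ls : List Nat) (acc : PySem.Set (List Char)) (x : List Char),
    x ∈ Ls.foldl
        (fun present L =>
          if L = 0 then PySem.Set.add present []
          else if L ≤ cs.length then
            (PySem.List.pyRange 0 ((cs.length : Int) - (L : Int) + 1) 1).foldl
              (fun present i =>
                PySem.Set.add present (PySem.List.slice cs (some i) (some (i + (L : Int)))))
              present
          else present)
        acc
      ↔ x ∈ acc ∨ ∃ L ∈ Ls, pvAdds cs L x := by
  intro Ls
  induction Ls with
  | nil => intro acc x; simp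
  | cons L t ih =>
      intro acc x
      rw [List.foldl_cons, ih]
      have hstep : x ∈ (if L = 0 then PySem.Set.add acc []
          else if L ≤ cs.length then
            (PySem.List.pyRange 0 ((cs.length : Int) - (L : Int) + 1) 1).foldl
              (fun present i =>
                PySem.Set.add present (PySem.List.slice cs (some i) (some (i + (L : Int)))))
              acc
          else acc) ↔ x ∈ acc ∨ pvAdds cs L x := by
        split_ifs with h0 hle
        · subst h0
          rw [PySem.Set.mem_add]
          unfold pvAdds
          constructor
          · rintro (hx | hx)
            · exact Or.inl hx
            · exact Or.inr ⟨by simp [hx], by simp [hx]⟩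
          · rintro (hx | ⟨hlen, _⟩)
            · exact Or.inl hx
            · exact Or.inr (List.eq_nil_of_length_eq_zero hlen)
        · rw [pv_mem_foldl_add]
          unfold pvAdds
          constructor
          · rintro (hx | ⟨i, hi, hx⟩)
            · exact Or.inl hx
            · rw [PySem.List.mem_pyRange_one] at hi
              obtain ⟨hi0, hi1⟩ := hi
              rw [pv_slice_eq cs L i hi0] at hx
              refine Or.inr ⟨?_, ?_⟩
              · rw [hx, List.length_take, List.length_drop]; omega
              · rw [hx]
                exact ((cs.drop i.toNat).take_prefix L).isInfix.trans (cs.drop_suffix i.toNat).isInfix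
          · rintro (hx | ⟨hlen, hinf⟩)
            · exact Or.inl hx
            · obtain ⟨pre, suf, hps⟩ := hinf
              refine Or.inr ⟨(pre.length : Int), ?_, ?_⟩
              · rw [PySem.List.mem_pyRange_one]
                constructor
                · positivity
                · have : pre.length + L + suf.length = cs.length := by
                    rw [← hps]; simp [hlen]; omega
                  omega
              · rw [pv_slice_eq cs L _ (by positivity)]
                have hdrop : cs.drop pre.length = x ++ suf := by
                  rw [← hps, List.append_assoc, List.drop_left]
                simp [hdrop, ← hlen]
        · constructor
          · intro hx; exact Or.inl hx
          · rintro (hx | ⟨hlen, hinf⟩)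
            · exact hx
            · exact absurd (hlen ▸ hinf.length_le) hle
      rw [hstep]
      constructor
      · rintro ((hx | hx) | ⟨L', hL', hx⟩)
        · exact Or.inl hx
        · exact Or.inr ⟨L, by simp, hx⟩
        · exact Or.inr ⟨L', by simp [hL'], hx⟩
      · rintro (hx | ⟨L', hL', hx⟩)
        · exact Or.inl (Or.inl hx)
        · rcases List.mem_cons.mp hL' with h1 | h1
          · exact Or.inl (Or.inr (h1 ▸ hx))
          · exact Or.inr ⟨L', h1, hx⟩

-- ===== VERDICT (by name: the statement is the Claim_ definition above) =====
theorem process_law_text2id_spec : Claim_equal_process_law_text2id := by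
  intro line dictionary _
  unfold Spec_process_law_text2id process_law_text2id process_law_text2id_alt
  by_cases hc : PySem.Str.strip line = ""
  · simp [hc]
  · simp only [hc, if_false, ne_eq, not_false_eq_true, if_true]
    rw [PySem.List.foldl_append_singleton_eq_map]
    apply List.map_congr_left
    intro w hw
    have hiff :
        (PySem.Set.contains
          ((PySem.Set.ofList (dictionary.map (fun w => w.toList.length))).foldl
            (fun present L =>
              if L = 0 then PySem.Set.add present []
              else if L ≤ (PySem.Str.strip line).toList.length then
                (PySem.List.pyRange 0 (((PySem.Str.strip line).toList.length : Int) - (L : Int) + 1) 1).foldl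
                  (fun present i =>
                    PySem.Set.add present
                      (PySem.List.slice (PySem.Str.strip line).toList (some i) (some (i + (L : Int)))))
                  present
              else present)
            PySem.Set.empty)
          w.toList = true)
        ↔ w.toList <:+: (PySem.Str.strip line).toList := by
      rw [PySem.Set.contains_iff, pv_mem_present]
      constructor
      · rintro (h | ⟨L, _, _, hinf⟩)
        · simp [PySem.Set.empty] at h
        · exact hinf
      · intro h
        refine Or.inr ⟨w.toList.length, ?_, rfl, h⟩
        rw [PySem.Set.mem_ofList]
        exact List.mem_map.mpr ⟨w, hw, rfl⟩
    have hcount : (0 < PySem.Str.count (PySem.Str.strip line) w) ↔ w.toList <:+: (PySem.Str.strip line).toList := by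
      rw [PySem.Str.count_eq]
      exact pv_count_pos_iff_infix _ _
    simp only [hcount, ← hiff]
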